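-- pv_equiv track=rewrite | github.com/techdeveloper-org/mcp-figma | server.py | _parse_file_key
-- ===== SOURCE A (Python) =====
-- def _parse_file_key(file_key_or_url: str) -> str:
--     """Extract a Figma file key from a URL or return it directly.
--
--     Handles both raw file keys (e.g. ``AbCdEfGhIjKl``) and full Figma URLs
--     (e.g. ``https://www.figma.com/file/AbCdEfGhIjKl/...``).
--
--     Args:
--         file_key_or_url: Raw file key or full Figma file URL.
--
--     Returns:
--         Extracted or unchanged file key string.
--     """
--     stripped = file_key_or_url.strip()
--     if stripped.startswith("http"):
--         # https://www.figma.com/file/<KEY>/Title or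
--         # https://www.figma.com/design/<KEY>/Title
--         parts = stripped.split("/")
--         for i, part in enumerate(parts):
--             if part in ("file", "design") and i + 1 < len(parts):
--                 candidate = parts[i + 1].split("?")[0].split("#")[0]
--                 if candidate:
--                     return candidate
--     return stripped
-- ===== SOURCE B (Python) =====
-- def _parse_file_key(file_key_or_url: str) -> str:
--     """Extract a Figma file key: single left-to-right substring scan for a
--     "/file/" or "/design/" marker instead of splitting into segments."""
--     stripped = file_key_or_url.strip()
--     if stripped.startswith("http"):
--         n = len(stripped)
--         for i in range(n):
--             for marker in ("/file/", "/design/"):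
--                 if stripped.startswith(marker, i):
--                     j = i + len(marker)
--                     k = j
--                     while k < n and stripped[k] not in "/?#":
--                         k += 1
--                     if k > j:
--                         return stripped[j:k]
--     return stripped
-- ===== Notes on version B (the rewrite author's own statement) =====
-- stated objective: alternative
-- what changed: A splits the URL on slashes and enumerates the segment list looking for an exact file/design segment with a non-empty successor; B never splits and instead does one left-to-right substring scan for a slash-delimited file or design marker, taking the characters after it up to the next slash, query or fragment delimiter.
import Mathlib
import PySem

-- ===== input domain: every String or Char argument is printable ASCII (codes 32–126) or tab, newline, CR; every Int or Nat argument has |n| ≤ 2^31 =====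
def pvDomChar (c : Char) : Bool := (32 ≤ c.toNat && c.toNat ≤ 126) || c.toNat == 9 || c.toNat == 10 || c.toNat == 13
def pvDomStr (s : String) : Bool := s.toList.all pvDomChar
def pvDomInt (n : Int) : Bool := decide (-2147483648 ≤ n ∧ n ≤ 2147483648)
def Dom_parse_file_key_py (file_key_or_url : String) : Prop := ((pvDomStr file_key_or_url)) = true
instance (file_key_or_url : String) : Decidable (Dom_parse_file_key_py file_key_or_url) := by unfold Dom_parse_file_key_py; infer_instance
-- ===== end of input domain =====

-- B replaces A's split-into-segments-and-enumerate loop by a single left-to-right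
-- substring scan for a slash-delimited file or design marker (objective: alternative).

-- ===== PORT A =====
-- the for-loop over enumerate(parts) with its early return
def pvALoop (parts : List String) : List (Int × String) → Option String
  | [] => none
  | (i, part) :: rest =>
    if (part = "file" ∨ part = "design") ∧ i + 1 < (parts.length : Int) then
      -- parts[i + 1]: in range by the guard
      let nxt := (PySem.List.pyGet? parts (i + 1)).getD ""
      -- x.split(sep)[0] with sep ≠ "": split? is some and the list is nonempty
      let c1 := ((PySem.Str.split? nxt "?").getD []).headD ""
      let candidate := ((PySem.Str.split? c1 "#").getD []).headD ""
      if candidate ≠ "" then some candidate else pvALoop parts rest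
    else pvALoop parts rest

def parse_file_key_py (file_key_or_url : String) : String :=
  let stripped := PySem.Str.strip file_key_or_url
  if PySem.Str.startswith stripped "http" then
    let parts := (PySem.Str.split? stripped "/").getD []
    match pvALoop parts (PySem.List.enumerate parts 0) with
    | some c => c
    | none => stripped
  else stripped

-- ===== PORT B =====
-- the inner while loop: chars until one of "/?#"
def pvSegTake (cs : List Char) : List Char :=
  cs.takeWhile (fun c => !(c == '/') && !(c == '?') && !(c == '#'))

-- one marker test at the current position (stripped.startswith(marker, i))
def pvTryAt (m cs : List Char) : Option (List Char) :=
  if m.isPrefixOf cs then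
    let seg := pvSegTake (cs.drop m.length)
    if seg.isEmpty then none else some seg
  else none

-- the outer while loop over positions i = 0 .. n-1
def pvScanB : List Char → Option (List Char)
  | [] => none
  | c :: rest =>
    match pvTryAt "/file/".toList (c :: rest) with
    | some seg => some seg
    | none =>
      match pvTryAt "/design/".toList (c :: rest) with
      | some seg => some seg
      | none => pvScanB rest

def parse_file_key_py_alt (file_key_or_url : String) : String :=
  let stripped := PySem.Str.strip file_key_or_url
  if PySem.Str.startswith stripped "http" then
    match pvScanB stripped.toList with
    | some seg => String.ofList seg
    | none => stripped
  else stripped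

-- ===== PRECONDITION & SPEC =====
def Spec_parse_file_key_py (file_key_or_url : String) (out : String) : Prop := out = parse_file_key_py_alt file_key_or_url
instance (file_key_or_url : String) (out : String) : Decidable (Spec_parse_file_key_py file_key_or_url out) := by unfold Spec_parse_file_key_py; infer_instance

-- ===== CLAIM (what is proved, stated in full; the proofs are below) =====
def Claim_equal_parse_file_key_py : Prop := ∀ (file_key_or_url : String), Dom_parse_file_key_py file_key_or_url → Spec_parse_file_key_py file_key_or_url (parse_file_key_py file_key_or_url)

-- ===== LEMMAS AND PROOFS =====

-- the common trim: chars of the candidate segment until one of "?#"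
def pvTrim (r : List Char) : List Char := r.takeWhile (fun c => !(c == '?') && !(c == '#'))

-- common reference scan over the segment list: first pair (marker, nonempty candidate)
def pvPairScan : List (List Char) → Option (List Char)
  | [] => none
  | [_] => none
  | p :: q :: rest =>
    if (p = "file".toList ∨ p = "design".toList) ∧ pvTrim q ≠ [] then some (pvTrim q)
    else pvPairScan (q :: rest)

-- structural recursion equivalent of Chars.splitOn with a one-char separator
def pvSplitC (sep : Char) : List Char → List (List Char)
  | [] => [[]]
  | c :: cs =>
    if c = sep then [] :: pvSplitC sep cs
    else
      match pvSplitC sep cs with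
      | s :: rest => (c :: s) :: rest
      | [] => [[c]]

-- inverse of pvSplitC '/'
def pvGlue : List (List Char) → List Char
  | [] => []
  | [s] => s
  | s :: t :: rest => s ++ '/' :: pvGlue (t :: rest)

def pvConsHead (pre : List Char) : List (List Char) → List (List Char)
  | h :: t => (pre ++ h) :: t
  | [] => []

theorem pvSplitC_ne_nil (sep : Char) (cs : List Char) : pvSplitC sep cs ≠ [] := by
  induction cs with
  | nil => simp [pvSplitC]
  | cons c cs ih =>
    simp only [pvSplitC]
    split_ifs
    · simp
    · cases h : pvSplitC sep cs <;> simp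

theorem pvGo_eq (sep : Char) : ∀ (fuel : Nat) (l cur : List Char) (acc : List (List Char)),
    l.length < fuel →
    PySem.Chars.splitOn.go [sep] fuel l cur acc
      = acc.reverse ++ pvConsHead cur.reverse (pvSplitC sep l) := by
  intro fuel
  induction fuel with
  | zero => intro l cur acc h; omega
  | succ f ih =>
    intro l cur acc h
    cases l with
    | nil =>
      simp only [PySem.Chars.splitOn.go, pvSplitC, pvConsHead]
      simp
    | cons c rest =>
      simp only [PySem.Chars.splitOn.go]
      have hlen : rest.length < f := by simpa using h
      by_cases hc : c = sep
      · have hp : ([sep].isPrefixOf (c :: rest)) = true := by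
          simp [List.isPrefixOf, hc]
        rw [if_pos hp]
        rw [ih _ _ _ (by simpa using hlen)]
        have hX := pvSplitC_ne_nil sep rest
        cases hs : pvSplitC sep rest with
        | nil => exact absurd hs hX
        | cons s t =>
          simp [pvSplitC, hc, hs, pvConsHead]
      · have hp : ([sep].isPrefixOf (c :: rest)) = false := by
          simp [List.isPrefixOf]
          intro hcc
          exact absurd hcc.symm hc
        rw [if_neg (by simp [hp])]
        rw [ih _ _ _ hlen]
        cases hs : pvSplitC sep rest with
        | nil => exact absurd hs (pvSplitC_ne_nil sep rest)
        | cons s t =>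
          simp [pvSplitC, hc, hs, pvConsHead]

theorem pvSplitOn_eq (sep : Char) (cs : List Char) :
    PySem.Chars.splitOn cs [sep] = pvSplitC sep cs := by
  unfold PySem.Chars.splitOn
  rw [pvGo_eq sep (cs.length + 1) cs [] [] (by omega)]
  cases hs : pvSplitC sep cs with
  | nil => exact absurd hs (pvSplitC_ne_nil sep cs)
  | cons s t => simp [pvConsHead]

theorem pvHeadD_pvSplitC (sep : Char) (cs : List Char) :
    (pvSplitC sep cs).headD [] = cs.takeWhile (fun c => !(c == sep)) := by
  induction cs with
  | nil => simp [pvSplitC]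
  | cons c cs ih =>
    simp only [pvSplitC, List.takeWhile]
    by_cases h : c = sep
    · simp [h]
    · simp only [if_neg h]
      cases hs : pvSplitC sep cs with
      | nil => exact absurd hs (pvSplitC_ne_nil sep cs)
      | cons s rest =>
        rw [hs] at ih
        simp at ih
        have hb : (c == sep) = false := by simp [h]
        simp [hb, ih]

theorem pvGlue_pvSplitC (cs : List Char) : pvGlue (pvSplitC '/' cs) = cs := by
  induction cs with
  | nil => simp [pvSplitC, pvGlue]
  | cons c cs ih =>
    simp only [pvSplitC]
    by_cases h : c = '/'
    · subst h
      simp only [if_pos rfl]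
      cases hs : pvSplitC '/' cs with
      | nil => exact absurd hs (pvSplitC_ne_nil _ cs)
      | cons s rest =>
        rw [hs] at ih
        simp only [pvGlue]
        cases rest <;> simp_all [pvGlue]
    · simp only [if_neg h]
      cases hs : pvSplitC '/' cs with
      | nil => exact absurd hs (pvSplitC_ne_nil _ cs)
      | cons s rest =>
        rw [hs] at ih
        cases rest <;> simp_all [pvGlue]

theorem pvNoslash_pvSplitC (cs : List Char) : ∀ s ∈ pvSplitC '/' cs, '/' ∉ s := by
  induction cs with
  | nil => simp [pvSplitC]
  | cons c cs ih =>
    simp only [pvSplitC]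
    by_cases h : c = '/'
    · simp only [if_pos h]
      intro s hmem
      rcases List.mem_cons.mp hmem with h1 | h1
      · simp [h1]
      · exact ih s h1
    · simp only [if_neg h]
      cases hs : pvSplitC '/' cs with
      | nil => exact absurd hs (pvSplitC_ne_nil _ cs)
      | cons s rest =>
        intro x hmem
        simp only [List.mem_cons] at hmem
        rcases hmem with h1 | h1
        · subst h1
          intro hm
          rcases List.mem_cons.mp hm with h2 | h2
          · exact h h2.symm
          · exact ih s (by simp [hs]) h2
        · exact ih x (by rw [hs]; exact List.mem_cons_of_mem _ h1)

theorem pvScanB_noslash (seg more : List Char) (h : '/' ∉ seg) :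
    pvScanB (seg ++ more) = pvScanB more := by
  induction seg with
  | nil => rfl
  | cons c seg ih =>
    have hc : c ≠ '/' := fun hcc => h (by simp [hcc])
    have h' : '/' ∉ seg := fun hm => h (List.mem_cons_of_mem _ hm)
    have h1 : pvTryAt "/file/".toList (c :: (seg ++ more)) = none := by
      rw [pvTryAt, if_neg]
      intro hp
      rw [show "/file/".toList = '/' :: "file/".toList from rfl] at hp
      rcases List.cons_prefix_cons.mp (List.isPrefixOf_iff_prefix.mp hp) with ⟨h2, _⟩
      exact hc h2.symm
    have h2 : pvTryAt "/design/".toList (c :: (seg ++ more)) = none := by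
      rw [pvTryAt, if_neg]
      intro hp
      rw [show "/design/".toList = '/' :: "design/".toList from rfl] at hp
      rcases List.cons_prefix_cons.mp (List.isPrefixOf_iff_prefix.mp hp) with ⟨h2, _⟩
      exact hc h2.symm
    calc pvScanB ((c :: seg) ++ more) = pvScanB (seg ++ more) := by
            rw [show (c :: seg) ++ more = c :: (seg ++ more) from rfl]
            rw [pvScanB, h1, h2]
      _ = pvScanB more := ih h'

theorem pvPrefix_slash (m : List Char) : ∀ (q tail : List Char),
    '/' ∉ m → '/' ∉ q → (tail = [] ∨ ∃ t, tail = '/' :: t) →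
    ((m ++ ['/']) <+: q ++ tail ↔ m = q ∧ ∃ t, tail = '/' :: t) := by
  induction m with
  | nil =>
    intro q tail hm hq ht
    cases q with
    | nil =>
      simp only [List.nil_append, true_and]
      constructor
      · intro hp
        rcases ht with rfl | ⟨t, rfl⟩
        · exact absurd hp (by simp)
        · exact ⟨t, rfl⟩
      · rintro ⟨t, rfl⟩
        simp
    | cons c q' =>
      have hc : c ≠ '/' := fun hcc => hq (by simp [hcc])
      simp only [List.nil_append, List.cons_append]
      constructor
      · intro hp
        rcases List.cons_prefix_cons.mp hp with ⟨h1, _⟩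
        exact absurd h1.symm hc
      · rintro ⟨h1, _⟩
        simp at h1
  | cons a m' ih =>
    intro q tail hm hq ht
    have ha : a ≠ '/' := fun hcc => hm (by simp [hcc])
    have hm' : '/' ∉ m' := fun hmm => hm (List.mem_cons_of_mem _ hmm)
    cases q with
    | nil =>
      simp only [List.nil_append]
      constructor
      · intro hp
        rcases ht with rfl | ⟨t, rfl⟩
        · exact absurd hp (by simp)
        · rcases List.cons_prefix_cons.mp hp with ⟨h1, _⟩
          exact absurd h1 ha
      · rintro ⟨h1, _⟩
        exact absurd h1 (by simp)
    | cons c q' =>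
      have hq' : '/' ∉ q' := fun hmm => hq (List.mem_cons_of_mem _ hmm)
      simp only [List.cons_append, List.cons_prefix_cons]
      rw [ih q' tail hm' hq' ht]
      constructor
      · rintro ⟨rfl, h2, h3⟩
        exact ⟨by rw [h2], h3⟩
      · rintro ⟨h1, h3⟩
        rcases List.cons_eq_cons.mp h1 with ⟨rfl, rfl⟩
        exact ⟨rfl, rfl, h3⟩

theorem pvSegTake_eq (r : List Char) : ∀ (tail : List Char), '/' ∉ r →
    (tail = [] ∨ ∃ t, tail = '/' :: t) →
    pvSegTake (r ++ tail) = pvTrim r := by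
  induction r with
  | nil =>
    intro tail _ ht
    rcases ht with rfl | ⟨t, rfl⟩ <;> simp [pvSegTake, pvTrim]
  | cons c r ih =>
    intro tail hr ht
    have hc : c ≠ '/' := fun hcc => hr (by simp [hcc])
    have hr' : '/' ∉ r := fun hmm => hr (List.mem_cons_of_mem _ hmm)
    simp only [List.cons_append, pvSegTake, pvTrim, List.takeWhile_cons]
    have hcb : (c == '/') = false := by simp [hc]
    rw [hcb]
    by_cases hq1 : c = '?'
    · simp [hq1]
    · by_cases hh1 : c = '#'
      · simp [hh1]
      · have hbq : (c == '?') = false := by simp [hq1]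
        have hbh : (c == '#') = false := by simp [hh1]
        simp only [hbq, hbh, Bool.not_false, Bool.and_self, Bool.and_true, Bool.true_and]
        rw [show (List.takeWhile (fun c => !(c == '/') && !(c == '?') && !(c == '#')) (r ++ tail)) = pvSegTake (r ++ tail) from rfl]
        rw [show (List.takeWhile (fun c => !(c == '?') && !(c == '#')) r) = pvTrim r from rfl]
        rw [ih tail hr' ht]

theorem pvGlue_shape (q : List Char) (segs : List (List Char)) :
    pvGlue (q :: segs) = q ++ (if segs.isEmpty then [] else '/' :: pvGlue segs) := by
  cases segs <;> simp [pvGlue]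

theorem pvMainB (segs : List (List Char)) : ∀ (p : List Char),
    '/' ∉ p → (∀ s ∈ segs, '/' ∉ s) →
    pvScanB (pvGlue (p :: segs)) = pvPairScan segs := by
  induction segs with
  | nil =>
    intro p hp _
    rw [show pvGlue [p] = p ++ [] by simp [pvGlue]]
    rw [pvScanB_noslash p [] hp]
    rfl
  | cons q rest ih =>
    intro p hp hall
    have hq : '/' ∉ q := hall q (by simp)
    have hall' : ∀ s ∈ rest, '/' ∉ s := fun s hs => hall s (List.mem_cons_of_mem _ hs)
    rw [show pvGlue (p :: q :: rest) = p ++ '/' :: pvGlue (q :: rest) from rfl]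
    rw [pvScanB_noslash p _ hp]
    -- tail shape of pvGlue (q :: rest)
    have hshape : pvGlue (q :: rest) = q ++ (if rest.isEmpty then [] else '/' :: pvGlue rest) :=
      pvGlue_shape q rest
    have htail : (if rest.isEmpty then ([] : List Char) else '/' :: pvGlue rest) = [] ∨
        ∃ t, (if rest.isEmpty then ([] : List Char) else '/' :: pvGlue rest) = '/' :: t := by
      cases rest <;> simp
    set tl := (if rest.isEmpty then ([] : List Char) else '/' :: pvGlue rest) with htl
    -- marker prefix characterisations
    have hfile : ("file".toList ++ ['/'] <+: q ++ tl) ↔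
        ("file".toList = q ∧ ∃ t, tl = '/' :: t) :=
      pvPrefix_slash "file".toList q tl (by decide) hq htail
    have hdesign : ("design".toList ++ ['/'] <+: q ++ tl) ↔
        ("design".toList = q ∧ ∃ t, tl = '/' :: t) :=
      pvPrefix_slash "design".toList q tl (by decide) hq htail
    by_cases hf : "file".toList = q ∧ rest ≠ []
    · -- the "/file/" marker matches here
      cases rest with
      | nil => exact absurd rfl hf.2
      | cons r rest' =>
        have hr : '/' ∉ r := hall' r (by simp)
        have htl2 : tl = '/' :: pvGlue (r :: rest') := by simp [htl]
        have hpf : ("/file/".toList.isPrefixOf ('/' :: (q ++ tl))) = true := by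
          apply List.isPrefixOf_iff_prefix.mpr
          rw [show "/file/".toList = '/' :: ("file".toList ++ ['/']) from rfl]
          exact List.cons_prefix_cons.mpr ⟨rfl, hfile.mpr ⟨hf.1, by rw [htl2]; exact ⟨_, rfl⟩⟩⟩
        have hdrop : List.drop "/file/".toList.length ('/' :: (q ++ tl)) = pvGlue (r :: rest') := by
          rw [htl2, ← hf.1]
          rfl
        have hseg : pvSegTake (List.drop "/file/".toList.length ('/' :: (q ++ tl))) = pvTrim r := by
          rw [hdrop, pvGlue_shape]
          exact pvSegTake_eq r _ hr (by cases rest' <;> simp)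
        rw [pvScanB, hshape, pvTryAt, if_pos hpf]
        simp only [hseg]
        by_cases hemp : pvTrim r = []
        · rw [if_pos (by simp [hemp])]
          have hpd : ("/design/".toList.isPrefixOf ('/' :: (q ++ tl))) = false := by
            apply Bool.eq_false_iff.mpr
            intro hp
            rw [show "/design/".toList = '/' :: ("design".toList ++ ['/']) from rfl] at hp
            have := (List.cons_prefix_cons.mp (List.isPrefixOf_iff_prefix.mp hp)).2
            have h2 := hdesign.mp this
            rw [← hf.1] at h2
            exact absurd h2.1 (by decide)
          rw [pvTryAt, if_neg (by simp only [hpd]; exact Bool.false_ne_true)]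
          rw [← hshape, ih q hq hall']
          rw [pvPairScan, if_neg (by simp [hemp])]
        · rw [if_neg (by simp [hemp])]
          rw [pvPairScan, if_pos ⟨Or.inl hf.1.symm, hemp⟩]
    · by_cases hd : "design".toList = q ∧ rest ≠ []
      · -- the "/design/" marker matches here
        cases rest with
        | nil => exact absurd rfl hd.2
        | cons r rest' =>
          have hr : '/' ∉ r := hall' r (by simp)
          have htl2 : tl = '/' :: pvGlue (r :: rest') := by simp [htl]
          have hpf : ("/file/".toList.isPrefixOf ('/' :: (q ++ tl))) = false := by
            apply Bool.eq_false_iff.mpr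
            intro hp
            rw [show "/file/".toList = '/' :: ("file".toList ++ ['/']) from rfl] at hp
            have h2 := hfile.mp (List.cons_prefix_cons.mp (List.isPrefixOf_iff_prefix.mp hp)).2
            rw [← hd.1] at h2
            exact absurd h2.1 (by decide)
          have hpd : ("/design/".toList.isPrefixOf ('/' :: (q ++ tl))) = true := by
            apply List.isPrefixOf_iff_prefix.mpr
            rw [show "/design/".toList = '/' :: ("design".toList ++ ['/']) from rfl]
            exact List.cons_prefix_cons.mpr ⟨rfl, hdesign.mpr ⟨hd.1, by rw [htl2]; exact ⟨_, rfl⟩⟩⟩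
          have hdrop : List.drop "/design/".toList.length ('/' :: (q ++ tl)) = pvGlue (r :: rest') := by
            rw [htl2, ← hd.1]
            rfl
          have hseg : pvSegTake (List.drop "/design/".toList.length ('/' :: (q ++ tl))) = pvTrim r := by
            rw [hdrop, pvGlue_shape]
            exact pvSegTake_eq r _ hr (by cases rest' <;> simp)
          rw [pvScanB, hshape, pvTryAt, if_neg (by simp only [hpf]; exact Bool.false_ne_true), pvTryAt, if_pos hpd]
          simp only [hseg]
          by_cases hemp : pvTrim r = []
          · rw [if_pos (by simp [hemp])]
            rw [← hshape, ih q hq hall']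
            rw [pvPairScan, if_neg (by simp [hemp])]
          · rw [if_neg (by simp [hemp])]
            rw [pvPairScan, if_pos ⟨Or.inr hd.1.symm, hemp⟩]
      · -- no marker at this separator
        have hpf : ("/file/".toList.isPrefixOf ('/' :: (q ++ tl))) = false := by
          apply Bool.eq_false_iff.mpr
          intro hp
          rw [show "/file/".toList = '/' :: ("file".toList ++ ['/']) from rfl] at hp
          have h2 := hfile.mp (List.cons_prefix_cons.mp (List.isPrefixOf_iff_prefix.mp hp)).2
          apply hf
          refine ⟨h2.1, ?_⟩
          rcases h2.2 with ⟨t, htt⟩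
          intro hrnil
          rw [htl, hrnil] at htt
          simp at htt
        have hpd : ("/design/".toList.isPrefixOf ('/' :: (q ++ tl))) = false := by
          apply Bool.eq_false_iff.mpr
          intro hp
          rw [show "/design/".toList = '/' :: ("design".toList ++ ['/']) from rfl] at hp
          have h2 := hdesign.mp (List.cons_prefix_cons.mp (List.isPrefixOf_iff_prefix.mp hp)).2
          apply hd
          refine ⟨h2.1, ?_⟩
          rcases h2.2 with ⟨t, htt⟩
          intro hrnil
          rw [htl, hrnil] at htt
          simp at htt
        rw [pvScanB, hshape, pvTryAt, if_neg (by simp only [hpf]; exact Bool.false_ne_true), pvTryAt, if_neg (by simp only [hpd]; exact Bool.false_ne_true)]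
        rw [← hshape, ih q hq hall']
        cases rest with
        | nil => rfl
        | cons r rest' =>
          rw [pvPairScan, if_neg]
          rintro ⟨hmk | hmk, _⟩
          · exact hf ⟨hmk.symm, by simp⟩
          · exact hd ⟨hmk.symm, by simp⟩


-- s.split(sep) with a one-character separator, down at the char level
theorem pvSplit_toList (q : String) (c : Char) (sep : String) (hsep : sep.toList = [c]) :
    ∃ ps, PySem.Str.split? q sep = some ps ∧ ps.map String.toList = pvSplitC c q.toList := by
  have h := PySem.Str.split?_map q sep
  rw [hsep] at h
  rw [show PySem.Chars.split? q.toList [c] = some (PySem.Chars.splitOn q.toList [c]) from by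
    simp [PySem.Chars.split?]] at h
  cases hs : PySem.Str.split? q sep with
  | none => rw [hs] at h; simp at h
  | some ps =>
    rw [hs] at h
    simp at h
    exact ⟨ps, rfl, by rw [h, pvSplitOn_eq]⟩

theorem pvHead_split_toList (q : String) (c : Char) (sep : String) (hsep : sep.toList = [c]) :
    (((PySem.Str.split? q sep).getD []).headD "").toList
      = q.toList.takeWhile (fun a => !(a == c)) := by
  obtain ⟨ps, hps, hmap⟩ := pvSplit_toList q c sep hsep
  rw [hps]
  have : (ps.headD "").toList = (ps.map String.toList).headD [] := by
    cases ps <;> simp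
  simp only [Option.getD_some, this, hmap, pvHeadD_pvSplitC]

-- the A-side candidate computation, char-level
theorem pvCand_toList (q : String) :
    (((PySem.Str.split? ((((PySem.Str.split? q "?").getD []).headD "")) "#").getD []).headD "").toList
      = pvTrim q.toList := by
  rw [pvHead_split_toList _ '#' "#" rfl]
  rw [pvHead_split_toList _ '?' "?" rfl]
  rw [List.takeWhile_takeWhile, pvTrim]
  congr 1
  funext a
  cases ha : (a == '?') <;> cases hb : (a == '#') <;> simp [ha, hb]

theorem pvMainA (l2 : List String) : ∀ (pre : List String),
    pvALoop (pre ++ l2) (PySem.List.enumerate l2 (pre.length : Int))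
      = (pvPairScan (l2.map String.toList)).map String.ofList := by
  induction l2 with
  | nil => intro pre; simp [PySem.List.enumerate_nil, pvALoop, pvPairScan]
  | cons p rest ih =>
    intro pre
    rw [PySem.List.enumerate_cons]
    cases rest with
    | nil =>
      rw [pvALoop, if_neg, PySem.List.enumerate_nil, pvALoop]
      · simp [pvPairScan]
      · rintro ⟨-, hlt⟩
        rw [List.length_append] at hlt
        simp at hlt
    | cons qq rest' =>
      have hnxt : (PySem.List.pyGet? (pre ++ p :: qq :: rest') ((pre.length : Int) + 1)).getD ""
          = qq := by
        rw [show ((pre.length : Int) + 1) = ((pre.length + 1 : Nat) : Int) from by push_cast; ring]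
        rw [PySem.List.pyGet?_natCast]
        rw [List.getElem?_append_right (by omega)]
        simp
      have hpre' : ((pre ++ [p]).length : Int) = (pre.length : Int) + 1 := by
        simp
      have happ : (pre ++ [p]) ++ (qq :: rest') = pre ++ p :: qq :: rest' := by
        simp
      have hih := ih (pre ++ [p])
      rw [hpre', happ] at hih
      by_cases hmk : p = "file" ∨ p = "design"
      · have hmkl : p.toList = "file".toList ∨ p.toList = "design".toList := by
          rcases hmk with h | h
          · exact Or.inl (by rw [h])
          · exact Or.inr (by rw [h])
        rw [pvALoop, if_pos ⟨hmk, by rw [List.length_append]; push_cast [List.length_cons]; omega⟩]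
        simp only [hnxt]
        by_cases hemp : pvTrim qq.toList = []
        · rw [if_neg (by
            intro hne
            apply hne
            apply String.toList_inj.mp
            rw [pvCand_toList, hemp]
            rfl)]
          rw [hih]
          simp only [List.map_cons]
          rw [pvPairScan, if_neg (by rintro ⟨-, hne⟩; exact hne hemp)]
        · rw [if_pos (by
            intro heq
            apply hemp
            rw [← pvCand_toList qq, heq]
            rfl)]
          simp only [List.map_cons]
          rw [pvPairScan, if_pos ⟨hmkl, hemp⟩]
          rw [Option.map_some]
          congr 1
          apply String.toList_inj.mp
          rw [String.toList_ofList, pvCand_toList]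
      · rw [pvALoop, if_neg (fun h => hmk h.1)]
        rw [hih]
        simp only [List.map_cons]
        rw [pvPairScan, if_neg]
        rintro ⟨hl | hl, -⟩
        · exact hmk (Or.inl (String.toList_inj.mp (by rw [hl])))
        · exact hmk (Or.inr (String.toList_inj.mp (by rw [hl])))

theorem pvPairScan_cons (p : List Char) (segs : List (List Char))
    (h1 : p ≠ "file".toList) (h2 : p ≠ "design".toList) :
    pvPairScan (p :: segs) = pvPairScan segs := by
  cases segs with
  | nil => rfl
  | cons q rest =>
    rw [pvPairScan, if_neg]
    rintro ⟨hmk | hmk, _⟩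
    · exact h1 hmk
    · exact h2 hmk

-- ===== VERDICT (by name: the statement is the Claim_ definition above) =====
theorem parse_file_key_py_spec : Claim_equal_parse_file_key_py := by
  unfold Claim_equal_parse_file_key_py
  intro s _
  unfold Spec_parse_file_key_py parse_file_key_py parse_file_key_py_alt
  by_cases hs : PySem.Str.startswith (PySem.Str.strip s) "http" = true
  · simp only [hs, if_pos]
    set stripped := PySem.Str.strip s with hstr
    have hpre : "http".toList <+: stripped.toList := by
      rw [PySem.Str.startswith_eq] at hs
      exact (PySem.Chars.startswith_iff _ _).mp hs
    obtain ⟨t0, ht0⟩ := hpre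
    have hL : stripped.toList = 'h' :: ('t' :: 't' :: 'p' :: t0) := by
      rw [← ht0]; rfl
    obtain ⟨ps, hps, hmap⟩ := pvSplit_toList stripped '/' "/" rfl
    rw [hps]
    simp only [Option.getD_some]
    have hA := pvMainA ps []
    simp only [List.nil_append, List.length_nil, Nat.cast_zero] at hA
    rw [hA]
    cases hsp : pvSplitC '/' stripped.toList with
    | nil => exact absurd hsp (pvSplitC_ne_nil _ _)
    | cons s0 segs =>
      -- the first segment begins with 'h', so it is not a marker
      have hs0 : s0 = 'h' :: List.takeWhile (fun a => !(a == '/')) ('t' :: 't' :: 'p' :: t0) := by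
        have hh := pvHeadD_pvSplitC '/' stripped.toList
        rw [hsp, hL] at hh
        simpa using hh
      have hns1 : s0 ≠ "file".toList := by rw [hs0]; intro h; cases h
      have hns2 : s0 ≠ "design".toList := by rw [hs0]; intro h; cases h
      have hBB : pvScanB stripped.toList = pvPairScan segs := by
        rw [← pvGlue_pvSplitC stripped.toList, hsp]
        refine pvMainB segs s0 ?_ ?_
        · exact pvNoslash_pvSplitC stripped.toList s0 (by rw [hsp]; simp)
        · intro x hx
          exact pvNoslash_pvSplitC stripped.toList x (by rw [hsp]; exact List.mem_cons_of_mem _ hx)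
      have hAA : List.map String.toList ps = s0 :: segs := by rw [hmap, hsp]
      rw [hAA, pvPairScan_cons s0 segs hns1 hns2, hBB]
      cases pvPairScan segs with
      | none => simp
      | some seg => simp
  · simp only [hs]
    simp
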